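-- pv_equiv track=rewrite | github.com/canonical/support-ai | src/support_ai/lib/chain.py | __stream
-- ===== SOURCE A (Python) =====
-- def __stream(output):
--     """
--     Streams the output in segments based on delimiters.
--
--     Args:
--         output: The full output text to be streamed.
--
--     Yields:
--         str: A segment of the output split by delimiters.
--     """
--     delimiters = [' ', '\t', '\n']
--     left = 0
--     for right, c in enumerate(output):
--         if c in delimiters:
--             yield output[left:right + 1]
--             left = right + 1
--     if left < len(output):
--         yield output[left:]
-- ===== SOURCE B (Python) =====
-- def __stream(output):
--     """Two staged passes: first collect the list of cut positions (the index
--     just past each delimiter, plus the end if a remainder is left), then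
--     slice the output between consecutive cuts."""
--     cuts = [i + 1 for i, c in enumerate(output) if c in (' ', '\t', '\n')]
--     if output and (not cuts or cuts[-1] != len(output)):
--         cuts.append(len(output))
--     prev = 0
--     for cut in cuts:
--         yield output[prev:cut]
--         prev = cut
-- ===== Notes on version B (the rewrite author's own statement) =====
-- stated objective: alternative
-- what changed: B works in two staged passes - it first builds the list of cut positions (the index after each delimiter, appending the end of the string when a remainder exists) and then slices the string between consecutive cuts - instead of A's single enumerate loop that yields slices while scanning and tracks a left cursor.
import Mathlib
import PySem

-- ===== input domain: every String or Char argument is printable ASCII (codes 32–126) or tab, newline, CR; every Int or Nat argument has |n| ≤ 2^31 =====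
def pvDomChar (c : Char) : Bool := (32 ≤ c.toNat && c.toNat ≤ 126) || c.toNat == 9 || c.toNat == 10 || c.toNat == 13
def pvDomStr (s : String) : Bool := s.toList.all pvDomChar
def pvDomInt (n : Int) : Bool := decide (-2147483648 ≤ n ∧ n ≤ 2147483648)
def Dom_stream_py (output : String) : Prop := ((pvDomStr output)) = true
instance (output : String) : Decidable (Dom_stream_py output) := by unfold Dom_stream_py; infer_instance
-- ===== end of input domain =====

-- B splits the work into two staged passes — collect the cut positions, then slice between
-- consecutive cuts — instead of A's single scanning loop that yields while tracking a cursor.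

-- ===== PORT A =====
-- delimiters = [' ', '\t', '\n']
def streamDelims : List Char := [' ', '\t', '\n']

-- the body of A's for-loop: state (left, yielded so far), item (right, c)
def streamStepA (output : String) (st : Int × List String) (rc : Int × Char) : Int × List String :=
  if streamDelims.contains rc.2 then
    (rc.1 + 1, st.2 ++ [PySem.Str.slice output (some st.1) (some (rc.1 + 1))])
  else st

def stream_py (output : String) : List String :=
  let r := (PySem.List.enumerate output.toList).foldl (streamStepA output) (0, [])
  if r.1 < PySem.Str.len output then r.2 ++ [PySem.Str.slice output (some r.1) none] else r.2

-- ===== PORT B =====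
def streamIsDelim (c : Char) : Bool := c == ' ' || c == '\t' || c == '\n'

-- pass 1: cuts = [i + 1 for i, c in enumerate(output) if c in (' ', '\t', '\n')]
def streamCuts (output : String) : List Int :=
  (PySem.List.enumerate output.toList).filterMap
    (fun ic => if streamIsDelim ic.2 then some (ic.1 + 1) else none)

-- pass 2's loop body: yield output[prev:cut]; prev = cut
def streamBStep (output : String) (st : Int × List String) (cut : Int) : Int × List String :=
  (cut, st.2 ++ [PySem.Str.slice output (some st.1) (some cut)])

def stream_py_alt (output : String) : List String :=
  let n : Int := PySem.Str.len output
  let cuts := streamCuts output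
  -- if output and (not cuts or cuts[-1] != len(output)): cuts.append(len(output))
  let cuts := if output ≠ "" ∧ (cuts = [] ∨ cuts.getLast? ≠ some n) then cuts ++ [n] else cuts
  (cuts.foldl (streamBStep output) (0, [])).2

-- ===== PRECONDITION & SPEC =====
def Spec_stream_py (output : String) (out : List String) : Prop := out = stream_py_alt output
instance (output : String) (out : List String) : Decidable (Spec_stream_py output out) := by unfold Spec_stream_py; infer_instance

-- ===== CLAIM =====
def Claim_equal_stream_py : Prop := ∀ (output : String), Dom_stream_py output → Spec_stream_py output (stream_py output)

-- ===== LEMMAS AND PROOFS =====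

theorem streamIsDelim_eq (c : Char) : streamDelims.contains c = streamIsDelim c := by
  simp only [streamDelims, streamIsDelim, List.contains_cons, List.contains_nil, Bool.or_false,
    Bool.or_assoc]

-- zeta-reduced forms of the two ports (definitional)
theorem stream_py_unfold (output : String) :
    stream_py output =
      (if ((PySem.List.enumerate output.toList).foldl (streamStepA output) (0, [])).1
            < PySem.Str.len output
       then ((PySem.List.enumerate output.toList).foldl (streamStepA output) (0, [])).2
              ++ [PySem.Str.slice output
                    (some ((PySem.List.enumerate output.toList).foldl
                      (streamStepA output) (0, [])).1) none]
       else ((PySem.List.enumerate output.toList).foldl (streamStepA output) (0, [])).2) := rfl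

theorem stream_py_alt_unfold (output : String) :
    stream_py_alt output =
      ((if output ≠ "" ∧ (streamCuts output = []
            ∨ (streamCuts output).getLast? ≠ some (PySem.Str.len output))
        then streamCuts output ++ [PySem.Str.len output]
        else streamCuts output).foldl (streamBStep output) (0, [])).2 := rfl

-- A's character-by-character fold equals B's fold over the filtered cut list.
theorem streamAB (output : String) : ∀ (rest : List Char) (k left : Int) (acc : List String),
    (PySem.List.enumerate rest k).foldl (streamStepA output) (left, acc)
  = ((PySem.List.enumerate rest k).filterMap
       (fun ic => if streamIsDelim ic.2 then some (ic.1 + 1) else none)).foldl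
      (streamBStep output) (left, acc) := by
  intro rest
  induction rest with
  | nil => intro k left acc; simp [PySem.List.enumerate_nil]
  | cons c rest ih =>
    intro k left acc
    rw [PySem.List.enumerate_cons]
    by_cases hd : streamIsDelim c
    · simp only [List.foldl_cons, List.filterMap_cons, hd, if_pos, streamStepA,
        streamIsDelim_eq, streamBStep]
      exact ih (k + 1) (k + 1) (acc ++ [PySem.Str.slice output (some left) (some (k + 1))])
    · simp only [List.foldl_cons, List.filterMap_cons, hd, Bool.false_eq_true, if_false,
        streamStepA, streamIsDelim_eq]
      exact ih (k + 1) left acc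

theorem streamAB0 (output : String) :
    (PySem.List.enumerate output.toList).foldl (streamStepA output) (0, [])
      = (streamCuts output).foldl (streamBStep output) (0, []) := by
  unfold streamCuts
  exact streamAB output output.toList 0 0 []

theorem streamFoldFst (output : String) : ∀ (cuts : List Int) (left : Int) (acc : List String),
    (cuts.foldl (streamBStep output) (left, acc)).1 = cuts.getLast?.getD left := by
  intro cuts
  induction cuts with
  | nil => intro left acc; simp
  | cons c cs ih =>
    intro left acc
    rw [List.foldl_cons]
    cases cs with
    | nil => simp [streamBStep]
    | cons d ds =>
      rw [show streamBStep output (left, acc) c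
            = (c, acc ++ [PySem.Str.slice output (some left) (some c)]) from rfl]
      rw [ih c _, List.getLast?_cons_cons]
      cases hz : (d :: ds).getLast? with
      | none => simp at hz
      | some z => rfl

theorem streamCuts_mem (output : String) (x : Int) (hx : x ∈ streamCuts output) :
    1 ≤ x ∧ x ≤ ((output.toList.length : Nat) : Int) := by
  unfold streamCuts at hx
  obtain ⟨ic, hic, hf⟩ := List.mem_filterMap.mp hx
  by_cases hd : streamIsDelim ic.2
  · simp only [hd, if_pos, Option.some.injEq] at hf
    obtain ⟨j, hj, hic'⟩ := (PySem.List.mem_enumerate_iff _ _ _).mp hic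
    subst hic'
    simp only [Int.zero_add] at hf ⊢
    omega
  · simp [hd] at hf

-- output[a:] = output[a:n]  when 0 ≤ a, n = len(output)
theorem streamSliceNone (output : String) (a : Int) (h0 : 0 ≤ a) :
    PySem.Str.slice output (some a) none
      = PySem.Str.slice output (some a) (some ((output.toList.length : Nat) : Int)) := by
  apply String.toList_inj.mp
  rw [PySem.Str.toList_slice, PySem.Str.toList_slice]
  simp only [PySem.Chars.slice_eq_listSlice]
  rw [PySem.List.slice_from _ h0,
    PySem.List.slice_toNat (ha := h0) (hb := by exact_mod_cast Nat.zero_le _)]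
  rw [Int.toNat_natCast]
  rw [List.take_of_length_le (by simp)]

theorem streamLenEq (output : String) :
    PySem.Str.len output = ((output.toList.length : Nat) : Int) := by
  simp [PySem.Str.len_eq]

theorem streamNe (output : String) :
    (output ≠ "") ↔ 0 < ((output.toList.length : Nat) : Int) := by
  constructor
  · intro h
    have h2 : output.toList ≠ [] := fun hnil => h (String.toList_inj.mp (by simp [hnil]))
    have h3 := List.length_pos_iff.mpr h2
    exact_mod_cast h3
  · intro h hq
    rw [hq] at h
    simp at h

-- the tail-condition analysis, stated over an arbitrary bounded cut list
theorem streamMain (output : String) (cuts : List Int)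
    (hcb : ∀ x ∈ cuts, 1 ≤ x ∧ x ≤ ((output.toList.length : Nat) : Int)) :
    (if ((cuts.foldl (streamBStep output) (0, [])).1 : Int) < ((output.toList.length : Nat) : Int)
     then (cuts.foldl (streamBStep output) (0, [])).2
            ++ [PySem.Str.slice output (some (cuts.foldl (streamBStep output) (0, [])).1) none]
     else (cuts.foldl (streamBStep output) (0, [])).2)
  = ((if output ≠ "" ∧ (cuts = []
          ∨ cuts.getLast? ≠ some ((output.toList.length : Nat) : Int))
      then cuts ++ [((output.toList.length : Nat) : Int)]
      else cuts).foldl (streamBStep output) (0, [])).2 := by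
  set n : Int := ((output.toList.length : Nat) : Int) with hn
  set r := cuts.foldl (streamBStep output) (0, []) with hr
  have hfst : r.1 = cuts.getLast?.getD 0 := streamFoldFst output cuts 0 []
  have hne : (output ≠ "") ↔ 0 < n := streamNe output
  by_cases hc : cuts = []
  · have hr1 : r.1 = 0 := by rw [hfst, hc]; rfl
    by_cases hlt : (0 : Int) < n
    · rw [if_pos (by omega : r.1 < n), if_pos ⟨hne.mpr hlt, Or.inl hc⟩, List.foldl_append]
      rw [show ([n].foldl (streamBStep output) r)
            = (n, r.2 ++ [PySem.Str.slice output (some r.1) (some n)]) from rfl]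
      rw [hr1, hn, streamSliceNone output 0 le_rfl]
    · rw [if_neg (by omega : ¬ r.1 < n),
          if_neg (fun h => hlt (hne.mp h.1))]
  · cases hy : cuts.getLast? with
    | none => exact absurd (List.getLast?_eq_none_iff.mp hy) hc
    | some y =>
      have hmem : y ∈ cuts := List.mem_of_getLast? hy
      have hb := hcb y hmem
      have hr1 : r.1 = y := by rw [hfst, hy]; rfl
      have hone : output ≠ "" := hne.mpr (by omega)
      by_cases hyn : y = n
      · rw [if_neg (by omega : ¬ r.1 < n)]
        rw [if_neg (by
          intro h
          rcases h.2 with h2 | h2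
          · exact hc h2
          · exact h2 (by rw [hyn]))]
      · have hlt : r.1 < n := by omega
        rw [if_pos hlt, if_pos ⟨hone, Or.inr (by simpa using hyn)⟩,
          List.foldl_append]
        rw [show ([n].foldl (streamBStep output) r)
              = (n, r.2 ++ [PySem.Str.slice output (some r.1) (some n)]) from rfl]
        rw [hn, streamSliceNone output r.1 (by omega)]

-- ===== VERDICT =====
theorem stream_py_spec : Claim_equal_stream_py := by
  intro output _
  unfold Spec_stream_py
  rw [stream_py_unfold, stream_py_alt_unfold, streamAB0 output, streamLenEq output]
  exact streamMain output (streamCuts output) (fun x hx => streamCuts_mem output x hx)
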